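-- pv_equiv track=rewrite | github.com/posl/comment_recommendation | script/mod_gen/2_time/zh/104_D/6.py | solve
-- ===== SOURCE A (Python) =====
-- def solve(s):
--     n = len(s)
--     mod = 10**9 + 7
--     ans = 0
--     a = 0
--     b = 0
--     c = 0
--     for i in range(n):
--         if s[i] == 'A':
--             a += 1
--         elif s[i] == 'B':
--             b += 1
--         elif s[i] == 'C':
--             c += 1
--         else:
--             ans = (ans*3 + c)%mod
--             ans = (ans*3 + b)%mod
--             ans = (ans*3 + a)%mod
--             a = (a*3)%mod
--             b = (b*3)%mod
--             c = (c*3)%mod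
--     return ans
-- ===== SOURCE B (Python) =====
-- def solve(s):
--     mod = 10**9 + 7
--     # split s into segments delimited by every non-'A'/'B'/'C' character;
--     # the trailing segment (after the last delimiter) never contributes.
--     parts = []
--     cur = ''
--     for ch in s:
--         if ch in 'ABC':
--             cur += ch
--         else:
--             parts.append(cur)
--             cur = ''
--     ans = a = b = c = 0
--     for seg in parts:
--         a += seg.count('A')
--         b += seg.count('B')
--         c += seg.count('C')
--         ans = (ans*3 + c) % mod
--         ans = (ans*3 + b) % mod
--         ans = (ans*3 + a) % mod
--         a = a*3 % mod
--         b = b*3 % mod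
--         c = c*3 % mod
--     return ans
-- ===== Notes on version B (the rewrite author's own statement) =====
-- stated objective: alternative
-- what changed: B first splits the string into segments delimited by non-ABC characters (dropping the trailing segment) and then folds over the segments, adding per-segment letter counts in bulk before each delimiter update, instead of A's single character loop with a 4-way branch.
import Mathlib
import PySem

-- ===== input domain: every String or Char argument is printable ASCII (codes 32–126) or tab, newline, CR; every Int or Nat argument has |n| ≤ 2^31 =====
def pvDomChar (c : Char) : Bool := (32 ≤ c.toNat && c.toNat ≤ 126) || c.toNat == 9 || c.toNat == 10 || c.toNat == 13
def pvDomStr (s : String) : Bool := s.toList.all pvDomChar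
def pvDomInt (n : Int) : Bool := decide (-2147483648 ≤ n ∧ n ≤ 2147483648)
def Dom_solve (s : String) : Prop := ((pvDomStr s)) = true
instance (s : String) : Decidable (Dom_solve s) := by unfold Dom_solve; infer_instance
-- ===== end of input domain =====

-- B splits on non-ABC delimiters and batches letter counts per segment; same value, alternative decomposition (no speed claim).

-- ===== PORT A =====
-- state (ans, a, b, c); one step of A's per-character loop
def solveStep (st : Int × Int × Int × Int) (ch : Char) : Int × Int × Int × Int :=
  match st with
  | (ans, a, b, c) =>
    if ch = 'A' then (ans, a + 1, b, c)
    else if ch = 'B' then (ans, a, b + 1, c)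
    else if ch = 'C' then (ans, a, b, c + 1)
    else
      let m : Int := 1000000007
      let ans1 := PySem.Int.mod (ans * 3 + c) m
      let ans2 := PySem.Int.mod (ans1 * 3 + b) m
      let ans3 := PySem.Int.mod (ans2 * 3 + a) m
      (ans3, PySem.Int.mod (a * 3) m, PySem.Int.mod (b * 3) m, PySem.Int.mod (c * 3) m)

def solve (s : String) : Int :=
  (s.toList.foldl solveStep (0, 0, 0, 0)).1

-- ===== PORT B =====
-- one step of B's splitting loop: state (parts, cur)
def splitStep (pc : List (List Char) × List Char) (ch : Char) : List (List Char) × List Char :=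
  if ch = 'A' ∨ ch = 'B' ∨ ch = 'C' then (pc.1, pc.2 ++ [ch])
  else (pc.1 ++ [pc.2], [])

-- one step of B's per-segment loop (seg.count 'X' ported as List.count, exact for a single-char needle)
def segStep (st : Int × Int × Int × Int) (seg : List Char) : Int × Int × Int × Int :=
  match st with
  | (ans, a, b, c) =>
    let a' := a + (seg.count 'A' : Int)
    let b' := b + (seg.count 'B' : Int)
    let c' := c + (seg.count 'C' : Int)
    let m : Int := 1000000007
    let ans1 := PySem.Int.mod (ans * 3 + c') m
    let ans2 := PySem.Int.mod (ans1 * 3 + b') m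
    let ans3 := PySem.Int.mod (ans2 * 3 + a') m
    (ans3, PySem.Int.mod (a' * 3) m, PySem.Int.mod (b' * 3) m, PySem.Int.mod (c' * 3) m)

def solve_alt (s : String) : Int :=
  let parts := (s.toList.foldl splitStep ([], [])).1
  (parts.foldl segStep (0, 0, 0, 0)).1

-- ===== PRECONDITION & SPEC =====
def Spec_solve (s : String) (out : Int) : Prop := out = solve_alt s
instance (s : String) (out : Int) : Decidable (Spec_solve s out) := by unfold Spec_solve; infer_instance

-- ===== CLAIM (what is proved, stated in full; the proofs are below) =====
def Claim_equal_solve : Prop := ∀ (s : String), Dom_solve s → Spec_solve s (solve s)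

-- ===== LEMMAS AND PROOFS =====

-- add the letter counts of `cur` to the counters of a state (ans unchanged)
def addCnt (st : Int × Int × Int × Int) (cur : List Char) : Int × Int × Int × Int :=
  (st.1, st.2.1 + (cur.count 'A' : Int), st.2.2.1 + (cur.count 'B' : Int),
   st.2.2.2 + (cur.count 'C' : Int))

theorem segStep_eq (st : Int × Int × Int × Int) (cur : List Char) (ch : Char)
    (hA : ch ≠ 'A') (hB : ch ≠ 'B') (hC : ch ≠ 'C') :
    segStep st cur = solveStep (addCnt st cur) ch := by
  obtain ⟨ans, a, b, c⟩ := st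
  simp [segStep, solveStep, addCnt, hA, hB, hC]

theorem addCnt_nil (st : Int × Int × Int × Int) : addCnt st [] = st := by
  obtain ⟨ans, a, b, c⟩ := st
  simp [addCnt]

theorem key (l : List Char) :
    ∀ (parts : List (List Char)) (cur : List Char) (st0 : Int × Int × Int × Int),
    (l.foldl solveStep (addCnt (parts.foldl segStep st0) cur)).1
      = ((l.foldl splitStep (parts, cur)).1.foldl segStep st0).1 := by
  induction l with
  | nil => intro parts cur st0; simp [addCnt]
  | cons ch l ih =>
    intro parts cur st0
    by_cases hA : ch = 'A'
    · subst hA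
      have h1 : solveStep (addCnt (parts.foldl segStep st0) cur) 'A'
          = addCnt (parts.foldl segStep st0) (cur ++ ['A']) := by
        obtain ⟨ans, a, b, c⟩ := parts.foldl segStep st0
        simp [solveStep, addCnt, List.count_append]
        ring
      have h2 : splitStep (parts, cur) 'A' = (parts, cur ++ ['A']) := by
        simp [splitStep]
      simp only [List.foldl_cons, h1, h2]
      exact ih parts (cur ++ ['A']) st0
    · by_cases hB : ch = 'B'
      · subst hB
        have h1 : solveStep (addCnt (parts.foldl segStep st0) cur) 'B'
            = addCnt (parts.foldl segStep st0) (cur ++ ['B']) := by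
          obtain ⟨ans, a, b, c⟩ := parts.foldl segStep st0
          simp [solveStep, addCnt, List.count_append]
          ring
        have h2 : splitStep (parts, cur) 'B' = (parts, cur ++ ['B']) := by
          simp [splitStep]
        simp only [List.foldl_cons, h1, h2]
        exact ih parts (cur ++ ['B']) st0
      · by_cases hC : ch = 'C'
        · subst hC
          have h1 : solveStep (addCnt (parts.foldl segStep st0) cur) 'C'
              = addCnt (parts.foldl segStep st0) (cur ++ ['C']) := by
            obtain ⟨ans, a, b, c⟩ := parts.foldl segStep st0
            simp [solveStep, addCnt, List.count_append]
            ring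
          have h2 : splitStep (parts, cur) 'C' = (parts, cur ++ ['C']) := by
            simp [splitStep]
          simp only [List.foldl_cons, h1, h2]
          exact ih parts (cur ++ ['C']) st0
        · have h1 : solveStep (addCnt (parts.foldl segStep st0) cur) ch
              = addCnt ((parts ++ [cur]).foldl segStep st0) [] := by
            simp only [List.foldl_append, List.foldl_cons, List.foldl_nil, addCnt_nil]
            exact (segStep_eq _ _ _ hA hB hC).symm
          have h2 : splitStep (parts, cur) ch = (parts ++ [cur], []) := by
            simp [splitStep, hA, hB, hC]
          simp only [List.foldl_cons, h1, h2]
          exact ih (parts ++ [cur]) [] st0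

-- ===== VERDICT (by name: the statement is the Claim_ definition above) =====
theorem solve_spec : Claim_equal_solve := by
  intro s _
  unfold Spec_solve solve solve_alt
  have := key s.toList [] [] (0, 0, 0, 0)
  simpa [addCnt] using this
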